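-- pv_equiv track=rewrite | github.com/Vignesh-Desmond/cdma-simulation | walsh_gen.py | walsh_generator_matrix
-- ===== SOURCE A (Python) =====
-- def walsh_generator_matrix(ini_mat, mat_size):
--     """
--     This function generates outerwalsh code matrix for chip sequences in CDMA
--
--     Args:
--             ini_mat (list): Inital matrix for Walsh code
--             mat_size (int): Walsh code of size N (nearest power of 2 greater than mat_size)
--     """
--     templist = ini_mat.copy()
--
--     if(len(ini_mat) >= mat_size):
--     	return ini_mat
--
--     aclimit = len(ini_mat) - 1
--     limit = len(ini_mat)*2
--
--     recurs_mat = [[0 for j in range(limit)] for i in range(limit)]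
--     outer, inner, cnt = 0, 0, 0
--     cnt = 0
--     for i in range(limit):
--     	for j in range(limit):
--     		if i >= limit / 2 and j >= limit / 2:
--     			recurs_mat[i][j] = templist[outer][inner] * -1
--     		else:
--     			recurs_mat[i][j] = templist[outer][inner]
--     		inner+= 1
--     		if inner> aclimit:
--     			inner= 0
--
--     	outer += 1
--     	if outer> aclimit:
--     		outer, inner = 0, 0
--     	cnt += 1
--
--     return walsh_generator_matrix(recurs_mat, mat_size)
-- ===== SOURCE B (Python) =====
-- def walsh_generator_matrix(ini_mat, mat_size):
--     """Iterative block doubling: each step replaces M by [[M, M], [M, -M]]."""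
--     mat = ini_mat
--     while len(mat) < mat_size:
--         top = [row + row for row in mat]
--         bottom = [row + [-x for x in row] for row in mat]
--         mat = top + bottom
--     return mat
-- ===== Notes on version B (the rewrite author's own statement) =====
-- stated objective: simpler
-- what changed: Replaces recursion plus a modular-index nested double loop with mutable outer/inner counters by an iterative loop that rebuilds the matrix directly as the block form [[M,M],[M,-M]] via row concatenation.
-- outside the precondition, e.g. on walsh_generator_matrix([[1, 2]], 2): A returns [[1, 1], [1, -1]], B returns [[1, 2, 1, 2], [1, 2, -1, -2]]
import Mathlib
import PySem

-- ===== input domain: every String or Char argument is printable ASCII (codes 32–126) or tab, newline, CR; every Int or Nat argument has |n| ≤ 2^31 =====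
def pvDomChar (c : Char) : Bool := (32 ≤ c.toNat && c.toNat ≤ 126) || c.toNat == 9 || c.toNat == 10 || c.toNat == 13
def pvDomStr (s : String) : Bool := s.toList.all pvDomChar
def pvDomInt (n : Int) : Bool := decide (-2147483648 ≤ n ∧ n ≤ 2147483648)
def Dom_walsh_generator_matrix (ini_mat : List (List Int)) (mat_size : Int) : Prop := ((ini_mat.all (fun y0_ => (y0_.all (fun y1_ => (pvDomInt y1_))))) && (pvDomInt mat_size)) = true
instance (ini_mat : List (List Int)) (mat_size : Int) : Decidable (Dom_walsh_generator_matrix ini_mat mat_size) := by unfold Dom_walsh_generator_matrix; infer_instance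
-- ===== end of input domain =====

-- B rebuilds the matrix iteratively as the block form [[M,M],[M,-M]] instead of A's
-- recursion with a modular-index nested double loop (objective: simpler).

-- ===== PORT A =====
-- inner `for j in range(limit)` loop of A, with the mutable `inner` counter threaded
-- through and returned; `cnt` count of remaining iterations; out-of-range indexing
-- defaults (never reached on Pre_ inputs).
def pvInnerA (row : List Int) (neg : Bool) (half aclimit : Int) : Nat → Int → Int → (List Int × Int)
  | 0, _, inner => ([], inner)
  | c + 1, j, inner =>
      let v := (PySem.List.pyGet? row inner).getD 0
      let cell := if neg && decide (j ≥ half) then -v else v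
      let inner' := if inner + 1 > aclimit then 0 else inner + 1
      let rest := pvInnerA row neg half aclimit c (j + 1) inner'
      (cell :: rest.1, rest.2)

-- outer `for i in range(limit)` loop of A; builds the rows of recurs_mat in order and
-- threads the mutable (outer, inner) counters; `jcnt` = limit as an iteration count.
def pvOuterA (t : List (List Int)) (half aclimit : Int) (jcnt : Nat) : Nat → Int → Int → Int → (List (List Int) × Int × Int)
  | 0, _, outer, inner => ([], outer, inner)
  | c + 1, i, outer, inner =>
      let row := (PySem.List.pyGet? t outer).getD []      -- templist[outer]
      let r := pvInnerA row (decide (i ≥ half)) half aclimit jcnt 0 inner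
      let outer1 := outer + 1
      let st := if outer1 > aclimit then ((0 : Int), (0 : Int)) else (outer1, r.2)
      let rest := pvOuterA t half aclimit jcnt c (i + 1) st.1 st.2
      (r.1 :: rest.1, rest.2)

-- A's recursion, with fuel for totality (fuel mat_size.toNat + 1 is never exhausted on
-- Pre_ inputs; Python diverges on empty input, which Pre_ excludes).  Python compares
-- i, j with limit / 2 (true division); limit is even so floordiv is exact.
def pvWalshA : Nat → List (List Int) → Int → List (List Int)
  | 0, ini, _ => ini
  | fuel + 1, ini, sz =>
      if (ini.length : Int) ≥ sz then ini
      else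
        let aclimit : Int := (ini.length : Int) - 1
        let limit : Int := (ini.length : Int) * 2
        let recurs := (pvOuterA ini (PySem.Int.floordiv limit 2) aclimit limit.toNat limit.toNat 0 0 0).1
        pvWalshA fuel recurs sz

def walsh_generator_matrix (ini_mat : List (List Int)) (mat_size : Int) : List (List Int) :=
  pvWalshA (mat_size.toNat + 1) ini_mat mat_size

-- ===== PORT B =====
def pvDouble (m : List (List Int)) : List (List Int) :=
  (m.map fun row => row ++ row) ++ (m.map fun row => row ++ row.map (fun x => -x))

-- B's while-loop, with the same totality fuel.
def pvWalshB : Nat → List (List Int) → Int → List (List Int)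
  | 0, m, _ => m
  | fuel + 1, m, sz =>
      if (m.length : Int) < sz then pvWalshB fuel (pvDouble m) sz else m

def walsh_generator_matrix_alt (ini_mat : List (List Int)) (mat_size : Int) : List (List Int) :=
  pvWalshB (mat_size.toNat + 1) ini_mat mat_size

-- ===== PRECONDITION & SPEC =====
-- Pre_ excludes inputs outside the function's natural domain (a square, nonempty Walsh
-- seed matrix) unless A returns immediately: on [] with mat_size > 0 A recurses forever
-- (RecursionError), and on a non-square matrix A either raises IndexError or silently
-- reads only the first len(ini_mat) entries of each row, an artefact no caller relies on.
def Pre_walsh_generator_matrix (ini_mat : List (List Int)) (mat_size : Int) : Prop :=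
  (ini_mat.length : Int) ≥ mat_size ∨ (ini_mat ≠ [] ∧ ∀ r ∈ ini_mat, r.length = ini_mat.length)
instance (ini_mat : List (List Int)) (mat_size : Int) : Decidable (Pre_walsh_generator_matrix ini_mat mat_size) := by unfold Pre_walsh_generator_matrix; infer_instance

def pvWitness_walsh_generator_matrix : List (List Int) × Int := ([[1, 1], [1, -1]], 4)

def Spec_walsh_generator_matrix (ini_mat : List (List Int)) (mat_size : Int) (out : List (List Int)) : Prop := out = walsh_generator_matrix_alt ini_mat mat_size
instance (ini_mat : List (List Int)) (mat_size : Int) (out : List (List Int)) : Decidable (Spec_walsh_generator_matrix ini_mat mat_size out) := by unfold Spec_walsh_generator_matrix; infer_instance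

-- ===== CLAIM (what is proved, stated in full; the proofs are below) =====
def Claim_equal_walsh_generator_matrix : Prop := ∀ (ini_mat : List (List Int)) (mat_size : Int), Dom_walsh_generator_matrix ini_mat mat_size → Pre_walsh_generator_matrix ini_mat mat_size → Spec_walsh_generator_matrix ini_mat mat_size (walsh_generator_matrix ini_mat mat_size)

-- ===== LEMMAS AND PROOFS =====

-- invariant: nonempty and square
def pvInv (m : List (List Int)) : Prop := m ≠ [] ∧ ∀ r ∈ m, r.length = m.length

-- running the inner loop over the suffix `t` of the row, all iterations carrying the
-- same sign `b`, consumes `t` exactly and wraps `inner` back to 0.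
theorem pvInnerA_suffix (neg : Bool) (half : Int) (b : Bool) :
    ∀ (t s : List Int) (j ac : Int),
      ac = ((s ++ t).length : Int) - 1 →
      (∀ k : Nat, k < t.length → (neg && decide ((j + k) ≥ half)) = b) →
      pvInnerA (s ++ t) neg half ac t.length j (s.length : Int)
        = (t.map (fun v => if b then -v else v), if t.isEmpty then (s.length : Int) else 0) := by
  intro t
  induction t with
  | nil => intro s j ac _ _; simp [pvInnerA]
  | cons x t' ih =>
      intro s j ac hac h
      have hx : PySem.List.pyGet? (s ++ x :: t') (s.length : Int) = some x :=
        PySem.List.pyGet?_append_length s t' x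
      have hb : (neg && decide (j ≥ half)) = b := by
        have := h 0 (by simp)
        simpa using this
      simp only [List.length_cons, pvInnerA, hx, Option.getD_some, hb]
      cases t' with
      | nil =>
          have hc : (s.length : Int) + 1 > ac := by subst hac; simp only [List.length_append, List.length_cons, List.length_nil]; push_cast; omega
          rw [if_pos hc]
          simp [pvInnerA]
      | cons y tt =>
          have hc : ¬ ((s.length : Int) + 1 > ac) := by subst hac; simp only [List.length_append, List.length_cons]; push_cast; omega
          rw [if_neg hc]
          have hcast : (s.length : Int) + 1 = ((s ++ [x]).length : Int) := by simp
          have h' : ∀ k : Nat, k < (y :: tt).length → (neg && decide ((j + 1 + k) ≥ half)) = b := by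
            intro k hk
            have := h (k + 1) (by simpa using Nat.succ_lt_succ hk)
            have e : j + ((k : Int) + 1) = j + 1 + k := by ring
            simpa [e] using this
          have hac' : ac = (((s ++ [x]) ++ y :: tt).length : Int) - 1 := by
            rw [List.append_assoc]; simpa using hac
          have key := ih (s ++ [x]) (j + 1) ac hac' h'
          rw [List.append_assoc] at key
          simp only [List.singleton_append] at key
          rw [hcast, key]
          simp

-- split the inner loop's iteration count
theorem pvInnerA_add (row : List Int) (neg : Bool) (half aclimit : Int) :
    ∀ (c1 c2 : Nat) (j inner : Int),
      pvInnerA row neg half aclimit (c1 + c2) j inner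
        = ((pvInnerA row neg half aclimit c1 j inner).1
              ++ (pvInnerA row neg half aclimit c2 (j + c1) (pvInnerA row neg half aclimit c1 j inner).2).1,
           (pvInnerA row neg half aclimit c2 (j + c1) (pvInnerA row neg half aclimit c1 j inner).2).2) := by
  intro c1
  induction c1 with
  | zero => intro c2 j inner; simp [pvInnerA]
  | succ c ih =>
      intro c2 j inner
      have hc : c + 1 + c2 = (c + c2) + 1 := by omega
      rw [hc]
      simp only [pvInnerA, ih]
      have e : j + 1 + (c : Int) = j + ((c : Nat) + 1 : Nat) := by push_cast; ring
      rw [e]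
      simp

-- one full row of A's loop on a square matrix: the row repeated, negated in the second
-- half iff neg, with inner wrapped back to 0.
theorem pvInnerA_row (row : List Int) (neg : Bool) (hrow : 1 ≤ row.length) :
    pvInnerA row neg (row.length : Int) ((row.length : Int) - 1) (2 * row.length) 0 0
      = (row ++ (if neg then row.map (fun x => -x) else row), 0) := by
  have h2 : 2 * row.length = row.length + row.length := by omega
  rw [h2, pvInnerA_add]
  have hne : row.isEmpty = false := by cases row <;> simp_all
  have h1 := pvInnerA_suffix neg (row.length : Int) false row [] 0 ((row.length : Int) - 1)
    (by simp)
    (by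
      intro k hk
      have hk' : decide ((0 : Int) + k ≥ (row.length : Int)) = false := by
        simp only [decide_eq_false_iff_not]; omega
      rw [hk', Bool.and_false])
  simp only [List.nil_append, List.length_nil, Nat.cast_zero, hne] at h1
  have h2' := pvInnerA_suffix neg (row.length : Int) neg row [] ((0 : Int) + row.length)
    ((row.length : Int) - 1) (by simp)
    (by
      intro k hk
      have hk' : decide ((0 : Int) + row.length + k ≥ (row.length : Int)) = true := by
        simp only [decide_eq_true_eq]; omega
      rw [hk', Bool.and_true])
  simp only [List.nil_append, List.length_nil, Nat.cast_zero, hne] at h2'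
  rw [h1]
  simp only [Bool.false_eq_true, if_false]
  rw [h2']
  cases neg <;> simp

-- running the outer loop over the suffix `t` of the matrix, all rows carrying the same
-- sign `b`, produces the corresponding doubled rows and wraps (outer, inner) to (0,0).
theorem pvOuterA_suffix (b : Bool) :
    ∀ (t s full : List (List Int)) (i ac half : Int) (jcnt : Nat),
      full = s ++ t →
      ac = (full.length : Int) - 1 →
      half = (full.length : Int) →
      jcnt = 2 * full.length →
      (∀ r ∈ full, r.length = full.length) →
      1 ≤ full.length →
      (∀ k : Nat, k < t.length → (decide ((i + k) ≥ (full.length : Int))) = b) →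
      pvOuterA full half ac jcnt t.length i (s.length : Int) 0
        = (t.map (fun r => r ++ (if b then r.map (fun x => -x) else r)),
           if t.isEmpty then ((s.length : Int), (0 : Int)) else ((0 : Int), (0 : Int))) := by
  intro t
  induction t with
  | nil => intro s full i ac half jcnt hf _ _ _ _ _ _; simp [pvOuterA]
  | cons r t' ih =>
      intro s full i ac half jcnt hf hac hhalf hjcnt hsq hn h
      subst hf
      have hr : PySem.List.pyGet? (s ++ r :: t') (s.length : Int) = some r :=
        PySem.List.pyGet?_append_length s t' r
      have hrl : r.length = (s ++ r :: t').length := hsq r (by simp)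
      have hbv : decide (i ≥ half) = b := by
        rw [hhalf]
        have := h 0 (by simp)
        simpa using this
      have hrow : pvInnerA r (decide (i ≥ half)) half ac jcnt 0 0
          = (r ++ (if decide (i ≥ half) then r.map (fun x => -x) else r), 0) := by
        have h0 := pvInnerA_row r (decide (i ≥ half)) (by rw [hrl]; simp; omega)
        rw [hrl, ← hac, ← hhalf, ← hjcnt] at h0
        exact h0
      rw [hbv] at hrow
      simp only [List.length_cons, pvOuterA, hr, Option.getD_some, hbv, hrow]
      cases t' with
      | nil =>
          have hc : (s.length : Int) + 1 > ac := by
            subst hac; simp only [List.length_append, List.length_cons, List.length_nil]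
            push_cast; omega
          rw [if_pos hc]
          simp [pvOuterA]
      | cons q tt =>
          have hc : ¬ ((s.length : Int) + 1 > ac) := by
            subst hac; simp only [List.length_append, List.length_cons]
            push_cast; omega
          rw [if_neg hc]
          simp only []
          have hcast : (s.length : Int) + 1 = ((s ++ [r]).length : Int) := by simp
          have h' : ∀ k : Nat, k < (q :: tt).length →
              (decide ((i + 1 + k) ≥ (((s ++ [r]) ++ q :: tt).length : Int))) = b := by
            intro k hk
            have := h (k + 1) (by simpa using Nat.succ_lt_succ hk)
            have e : i + ((k : Int) + 1) = i + 1 + k := by ring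
            rw [List.append_assoc]
            simpa [e] using this
          have key := ih (s ++ [r]) ((s ++ [r]) ++ q :: tt) (i + 1) ac half jcnt rfl
            (by rw [List.append_assoc]; simpa using hac)
            (by rw [List.append_assoc]; simpa using hhalf)
            (by rw [List.append_assoc]; simpa using hjcnt)
            (by rw [List.append_assoc]; simpa using hsq)
            (by simp only [List.length_append, List.length_cons]; omega)
            h'
          rw [List.append_assoc] at key
          simp only [List.singleton_append] at key
          rw [hcast, key]
          simp

-- split the outer loop's iteration count
theorem pvOuterA_add (t : List (List Int)) (half aclimit : Int) (jcnt : Nat) :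
    ∀ (c1 c2 : Nat) (i outer inner : Int),
      pvOuterA t half aclimit jcnt (c1 + c2) i outer inner
        = ((pvOuterA t half aclimit jcnt c1 i outer inner).1
              ++ (pvOuterA t half aclimit jcnt c2 (i + c1) (pvOuterA t half aclimit jcnt c1 i outer inner).2.1 (pvOuterA t half aclimit jcnt c1 i outer inner).2.2).1,
           (pvOuterA t half aclimit jcnt c2 (i + c1) (pvOuterA t half aclimit jcnt c1 i outer inner).2.1 (pvOuterA t half aclimit jcnt c1 i outer inner).2.2).2) := by
  intro c1
  induction c1 with
  | zero => intro c2 i outer inner; simp [pvOuterA]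
  | succ c ih =>
      intro c2 i outer inner
      have : c + 1 + c2 = (c + c2) + 1 := by omega
      rw [this]
      simp only [pvOuterA, ih]
      have e : i + 1 + (c : Int) = i + ((c : Nat) + 1 : Nat) := by push_cast; ring
      rw [e]
      simp

-- A's whole doubling step on a square nonempty matrix IS B's block doubling
theorem pvBuild_eq_double (m : List (List Int)) (hinv : pvInv m) :
    (pvOuterA m (PySem.Int.floordiv ((m.length : Int) * 2) 2) ((m.length : Int) - 1)
        ((m.length : Int) * 2).toNat ((m.length : Int) * 2).toNat 0 0 0).1 = pvDouble m := by
  obtain ⟨hne, hsq⟩ := hinv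
  have hn : 1 ≤ m.length := by cases m <;> simp_all
  have hhalf : PySem.Int.floordiv ((m.length : Int) * 2) 2 = (m.length : Int) := by
    rw [PySem.Int.floordiv_eq_ediv_of_pos (by omega)]
    omega
  have hcnt : ((m.length : Int) * 2).toNat = 2 * m.length := by omega
  rw [hhalf, hcnt]
  have hadd := pvOuterA_add m (m.length : Int) ((m.length : Int) - 1) (2 * m.length)
    m.length m.length 0 0 0
  have h2 : m.length + m.length = 2 * m.length := by omega
  rw [h2] at hadd
  rw [hadd]
  have hne' : m.isEmpty = false := by cases m <;> simp_all
  have h1 := pvOuterA_suffix false m [] m 0 ((m.length : Int) - 1) (m.length : Int) (2 * m.length)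
    (by simp) rfl rfl rfl hsq hn
    (by
      intro k hk
      simp only [decide_eq_false_iff_not]
      omega)
  simp only [List.length_nil, Nat.cast_zero, hne'] at h1
  have hB := pvOuterA_suffix true m [] m ((0 : Int) + m.length) ((m.length : Int) - 1) (m.length : Int) (2 * m.length)
    (by simp) rfl rfl rfl hsq hn
    (by
      intro k hk
      simp only [decide_eq_true_eq]
      omega)
  simp only [List.length_nil, Nat.cast_zero, hne'] at hB
  rw [h1]
  simp only [Bool.false_eq_true, if_false]
  rw [hB]
  simp [pvDouble]

theorem pvInv_double (m : List (List Int)) (hinv : pvInv m) : pvInv (pvDouble m) := by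
  obtain ⟨hne, hsq⟩ := hinv
  constructor
  · cases m <;> simp_all [pvDouble]
  · intro r hr
    simp only [pvDouble, List.mem_append, List.mem_map] at hr
    have hl : (pvDouble m).length = 2 * m.length := by simp [pvDouble]; omega
    rw [hl]
    rcases hr with ⟨q, hq, rfl⟩ | ⟨q, hq, rfl⟩ <;> simp [hsq q hq] <;> omega

-- the two fueled loops agree on every invariant-satisfying (or already-large) matrix
theorem pvWalsh_eq : ∀ (fuel : Nat) (m : List (List Int)) (sz : Int),
    ((m.length : Int) ≥ sz ∨ pvInv m) → pvWalshA fuel m sz = pvWalshB fuel m sz := by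
  intro fuel
  induction fuel with
  | zero => intro m sz _; rfl
  | succ f ih =>
      intro m sz hpre
      by_cases hge : (m.length : Int) ≥ sz
      · simp [pvWalshA, pvWalshB, hge, not_lt.mpr hge]
      · have hinv : pvInv m := hpre.resolve_left hge
        have hlt : (m.length : Int) < sz := lt_of_not_ge hge
        simp only [pvWalshA, pvWalshB, hge, if_false, hlt, if_true]
        rw [pvBuild_eq_double m hinv]
        exact ih (pvDouble m) sz (Or.inr (pvInv_double m hinv))

-- ===== VERDICT (by name: the statement is the Claim_ definition above) =====
theorem walsh_generator_matrix_spec : Claim_equal_walsh_generator_matrix := by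
  intro ini_mat mat_size _ hpre
  unfold Spec_walsh_generator_matrix walsh_generator_matrix walsh_generator_matrix_alt
  exact pvWalsh_eq (mat_size.toNat + 1) ini_mat mat_size hpre
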